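-- pv_equiv track=rewrite | github.com/Smailagic/HWK_visualisierung | visual_dialog.py | compute_collocations
-- ===== SOURCE A (Python) =====
-- from collections import defaultdict
--
-- def compute_collocations(values_list, product_list, target):
--     collocations = defaultdict(int)
--
--     # Durch jede Zeile iterieren
--     for values, products in zip(values_list, product_list):
--         values = [v.strip() for v in values.split(",")]
--         products = [p.strip() for p in products.split(",")]
--
--         if target in values:
--             for value in values:
--                 if value != target:
--                     collocations[(target, value)] += 1
--             for product in products:
--                 collocations[(target, product)] += 1
--
--     return collocations
-- ===== SOURCE B (Python) =====
-- from collections import defaultdict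
--
-- def compute_collocations(values_list, product_list, target):
--     # Stage 1: tokenize every row.
--     rows = [([v.strip() for v in vs.split(",")], [p.strip() for p in ps.split(",")])
--             for vs, ps in zip(values_list, product_list)]
--     # Stage 2: collect the flat list of co-occurrence pairs from matching rows.
--     pairs = []
--     for vs, ps in rows:
--         if target in vs:
--             pairs += [(target, v) for v in vs if v != target]
--             pairs += [(target, p) for p in ps]
--     # Stage 3: tally each distinct pair (first-occurrence order) by scanning the list.
--     result = defaultdict(int)
--     for key in dict.fromkeys(pairs):
--         result[key] = pairs.count(key)
--     return result
-- ===== Notes on version B (the rewrite author's own statement) =====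
-- stated objective: alternative
-- what changed: Replaces in-place per-pair dict increments inside the row loop with three staged passes: tokenize all rows, flatten matching rows into one list of pairs, then dedup the pairs (dict.fromkeys) and tally each distinct pair with list.count.
import Mathlib
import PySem

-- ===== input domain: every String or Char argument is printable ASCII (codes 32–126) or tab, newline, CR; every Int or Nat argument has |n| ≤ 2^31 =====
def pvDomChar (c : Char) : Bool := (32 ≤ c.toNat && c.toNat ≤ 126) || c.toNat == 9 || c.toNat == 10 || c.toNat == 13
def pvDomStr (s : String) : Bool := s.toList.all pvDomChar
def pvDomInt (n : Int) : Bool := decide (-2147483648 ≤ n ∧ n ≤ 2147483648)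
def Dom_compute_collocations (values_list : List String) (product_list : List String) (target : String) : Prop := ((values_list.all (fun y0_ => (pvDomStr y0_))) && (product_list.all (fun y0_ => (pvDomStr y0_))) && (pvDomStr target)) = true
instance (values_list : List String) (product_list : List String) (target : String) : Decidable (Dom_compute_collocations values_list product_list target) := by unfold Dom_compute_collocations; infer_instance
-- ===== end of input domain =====

-- B replaces A's in-place per-pair increments with staged passes: tokenize rows, flatten matching
-- rows into one pair list, then dedup and tally each distinct pair by scanning (alternative, same order of output).

-- ===== PORT A =====
-- shared row tokenisation: '[x.strip() for x in s.split(",")]' (split? is some since sep = "," is nonempty)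
def pvSplitStrip (s : String) : List String := ((PySem.Str.split? s ",").getD []).map PySem.Str.strip

-- A: iterate rows, and for each matching row bump each pair's count in the dict in place.
def compute_collocations (values_list : List String) (product_list : List String) (target : String) : List (String × String × Int) :=
  let d := (values_list.zip product_list).foldl (fun d vp =>
    let vs := pvSplitStrip vp.1
    let ps := pvSplitStrip vp.2
    if vs.contains target then
      let d := vs.foldl (fun d v => if v ≠ target then d.modify (target, v) 0 (· + 1) else d) d
      ps.foldl (fun d p => d.modify (target, p) 0 (· + 1)) d
    else d) (PySem.Dict.empty)
  d.items.map (fun kv => (kv.1.1, kv.1.2, kv.2))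

-- ===== PORT B =====
-- B: stage 1 tokenize all rows; stage 2 flatten matching rows into one pair list;
-- stage 3 dedup (dict.fromkeys order) and tally each distinct pair with list.count.
def compute_collocations_alt (values_list : List String) (product_list : List String) (target : String) : List (String × String × Int) :=
  let rows := (values_list.zip product_list).map (fun vp => (pvSplitStrip vp.1, pvSplitStrip vp.2))
  let pairs := rows.foldl (fun acc r =>
    if r.1.contains target then
      acc ++ (r.1.filter (fun v => v ≠ target)).map (fun v => (target, v))
          ++ r.2.map (fun p => (target, p))
    else acc) []
  (PySem.List.dedup pairs).map (fun k => (k.1, k.2, (pairs.count k : Int)))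

-- ===== PRECONDITION & SPEC =====
def Spec_compute_collocations (values_list : List String) (product_list : List String) (target : String) (out : List (String × String × Int)) : Prop := out = compute_collocations_alt values_list product_list target
instance (values_list : List String) (product_list : List String) (target : String) (out : List (String × String × Int)) : Decidable (Spec_compute_collocations values_list product_list target out) := by unfold Spec_compute_collocations; infer_instance

-- ===== CLAIM =====
def Claim_equal_compute_collocations : Prop := ∀ (values_list : List String) (product_list : List String) (target : String), Dom_compute_collocations values_list product_list target → Spec_compute_collocations values_list product_list target (compute_collocations values_list product_list target)

-- ===== LEMMAS AND PROOFS =====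

-- the pairs one row contributes to the flat stream (proof-side abbreviation)
def pvRowPairs (target : String) (vp : String × String) : List (String × String) :=
  let vs := pvSplitStrip vp.1
  let ps := pvSplitStrip vp.2
  if vs.contains target then
    (vs.filter (fun v => v ≠ target)).map (fun v => (target, v)) ++ ps.map (fun p => (target, p))
  else []

-- A's guarded values-loop = tallying the filtered+mapped pair list
theorem pv_values_loop (target : String) (vs : List String)
    (d : PySem.Dict (String × String) Int) :
    vs.foldl (fun d v => if v ≠ target then d.modify (target, v) 0 (· + 1) else d) d =
      ((vs.filter (fun v => v ≠ target)).map (fun v => (target, v))).foldl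
        (fun d x => d.modify x 0 (· + 1)) d := by
  induction vs generalizing d with
  | nil => rfl
  | cons v vs ih =>
    by_cases h : v = target <;> simp [h] <;> simpa using ih _

-- A's products-loop = tallying the mapped pair list
theorem pv_products_loop (target : String) (ps : List String)
    (d : PySem.Dict (String × String) Int) :
    ps.foldl (fun d p => d.modify (target, p) 0 (· + 1)) d =
      (ps.map (fun p => (target, p))).foldl (fun d x => d.modify x 0 (· + 1)) d := by
  induction ps generalizing d with
  | nil => rfl
  | cons p ps ih => simp [ih]

-- one row of A's loop = tallying that row's flat pairs
theorem pv_row_step (target : String) (vp : String × String)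
    (d : PySem.Dict (String × String) Int) :
    (let vs := pvSplitStrip vp.1
     let ps := pvSplitStrip vp.2
     if vs.contains target then
       let d := vs.foldl (fun d v => if v ≠ target then d.modify (target, v) 0 (· + 1) else d) d
       ps.foldl (fun d p => d.modify (target, p) 0 (· + 1)) d
     else d) =
      (pvRowPairs target vp).foldl (fun d x => d.modify x 0 (· + 1)) d := by
  simp only [pvRowPairs]
  by_cases h : target ∈ pvSplitStrip vp.1
  · simp only [List.contains_iff_mem, if_pos h, pv_values_loop, pv_products_loop,
      List.foldl_append]
  · simp [h]

-- folding over a flattened list = folding row by row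
theorem pv_foldl_flatMap {α β σ : Type} (g : β → List α) (f : σ → α → σ) (xs : List β) (d : σ) :
    (xs.flatMap g).foldl f d = xs.foldl (fun d r => (g r).foldl f d) d := by
  induction xs generalizing d with
  | nil => rfl
  | cons x xs ih => simp [List.flatMap_cons, List.foldl_append, ih]

-- A's whole dict = Counter of the flat pair list
theorem pv_A_dict (values_list product_list : List String) (target : String) :
    (values_list.zip product_list).foldl (fun d vp =>
      let vs := pvSplitStrip vp.1
      let ps := pvSplitStrip vp.2
      if vs.contains target then
        let d := vs.foldl (fun d v => if v ≠ target then d.modify (target, v) 0 (· + 1) else d) d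
        ps.foldl (fun d p => d.modify (target, p) 0 (· + 1)) d
      else d) (PySem.Dict.empty) =
    PySem.Dict.counter ((values_list.zip product_list).flatMap (pvRowPairs target)) := by
  rw [PySem.Dict.counter_eq_foldl, pv_foldl_flatMap]
  exact PySem.List.foldl_congr_mem _ _ _ _ (fun d vp _ => pv_row_step target vp d)

-- B's foldl-append pair list = the flat pair list
theorem pv_B_pairs (values_list product_list : List String) (target : String) :
    ((values_list.zip product_list).map (fun vp => (pvSplitStrip vp.1, pvSplitStrip vp.2))).foldl
      (fun acc r =>
        if r.1.contains target then
          acc ++ (r.1.filter (fun v => v ≠ target)).map (fun v => (target, v))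
              ++ r.2.map (fun p => (target, p))
        else acc) [] =
    (values_list.zip product_list).flatMap (pvRowPairs target) := by
  have h := PySem.List.foldl_congr_mem
    ((values_list.zip product_list).map (fun vp => (pvSplitStrip vp.1, pvSplitStrip vp.2)))
    (fun acc (r : List String × List String) =>
      if r.1.contains target then
        acc ++ (r.1.filter (fun v => v ≠ target)).map (fun v => (target, v))
            ++ r.2.map (fun p => (target, p))
      else acc)
    (fun acc r => acc ++
      (if r.1.contains target then
        (r.1.filter (fun v => v ≠ target)).map (fun v => (target, v))
          ++ r.2.map (fun p => (target, p))
       else []))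
    []
    (fun acc r _ => by by_cases hc : target ∈ r.1 <;> simp [hc, List.append_assoc])
  rw [h]
  rw [PySem.List.foldl_append_eq_flatMap, List.flatMap_map]
  rfl

-- ===== VERDICT =====
theorem compute_collocations_spec : Claim_equal_compute_collocations := by
  intro values_list product_list target _
  simp only [Spec_compute_collocations, compute_collocations, compute_collocations_alt]
  rw [pv_A_dict, pv_B_pairs, PySem.Dict.items_counter]
  simp [List.map_map, PySem.List.dedup_eq_ofList, Function.comp]
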